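-- pv_equiv track=rewrite | github.com/bpopeters/2022-shared-tasks | segmentation/scripts/sentence2word.py | add_context_marker
-- ===== SOURCE A (Python) =====
-- def add_context_marker(surface_seq):
--     surface_toks = surface_seq.split()
--     # for each token in surface_toks
--     ret = []
--     for i, tok in enumerate(surface_toks):
--         labeled_seq = [t if i != j else "<p> {} </p>".format(t)
--                        for j, t in enumerate(surface_toks)]
--         labeled_string = " ".join(labeled_seq)
--         ret.append(labeled_string)
--     return ret
-- ===== SOURCE B (Python) =====
-- def add_context_marker(surface_seq):
--     toks = surface_seq.split()
--     n = len(toks)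
--     # pass 1: prefixes[i] = " ".join(toks[:i]), built incrementally
--     prefixes = []
--     acc = ""
--     for i, t in enumerate(toks):
--         prefixes.append(acc)
--         acc = t if i == 0 else acc + " " + t
--     # pass 2: suffixes[i] = " ".join(toks[i+1:]), built incrementally on the reversed list
--     suffixes_rev = []
--     acc = ""
--     for k, t in enumerate(reversed(toks)):
--         suffixes_rev.append(acc)
--         acc = t if k == 0 else t + " " + acc
--     suffixes = list(reversed(suffixes_rev))
--     # pass 3: assemble each variant from the tables
--     out = []
--     for i, (pre, t, suf) in enumerate(zip(prefixes, toks, suffixes)):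
--         parts = ([pre] if i > 0 else []) \
--                 + ["<p> {} </p>".format(t)] \
--                 + ([suf] if i < n - 1 else [])
--         out.append(" ".join(parts))
--     return out
-- ===== Notes on version B (the rewrite author's own statement) =====
-- stated objective: alternative
-- what changed: A rebuilds and re-joins the entire token list for every token (quadratic joins); B builds prefix and suffix context tables in two incremental passes and assembles each variant from the tables in a third pass.
import Mathlib
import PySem

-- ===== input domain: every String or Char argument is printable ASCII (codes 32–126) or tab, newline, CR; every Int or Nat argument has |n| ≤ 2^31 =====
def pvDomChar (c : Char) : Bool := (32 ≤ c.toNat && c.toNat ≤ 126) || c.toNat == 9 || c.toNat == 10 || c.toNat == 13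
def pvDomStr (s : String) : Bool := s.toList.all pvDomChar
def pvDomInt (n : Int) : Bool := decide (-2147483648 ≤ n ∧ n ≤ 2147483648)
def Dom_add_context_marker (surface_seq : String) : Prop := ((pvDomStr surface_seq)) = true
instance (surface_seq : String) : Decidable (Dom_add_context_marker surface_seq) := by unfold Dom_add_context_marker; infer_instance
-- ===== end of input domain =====

-- B replaces A's per-token rescan of the whole token list by two incremental context-table passes
-- (prefix strings forward, suffix strings backward) plus one assembly pass (objective: alternative).

-- "<p> {} </p>".format(t)  (shared literal format expression of both sources)
def pvMark (t : String) : String := "<p> " ++ t ++ " </p>"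

-- ===== PORT A =====
def add_context_marker (surface_seq : String) : List String :=
  let surface_toks := PySem.Str.split₀ surface_seq
  (PySem.List.enumerate surface_toks).foldl
    (fun ret p =>
      let labeled_seq := (PySem.List.enumerate surface_toks).map
        (fun q => if p.1 ≠ q.1 then q.2 else pvMark q.2)
      let labeled_string := PySem.Str.join " " labeled_seq
      ret ++ [labeled_string]) []

-- ===== PORT B =====
def add_context_marker_alt (surface_seq : String) : List String :=
  let toks := PySem.Str.split₀ surface_seq
  let n : Int := toks.length
  -- pass 1: prefixes[i] = " ".join(toks[:i]), built incrementally
  let p1 := (PySem.List.enumerate toks).foldl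
    (fun (st : List String × String) p =>
      (st.1 ++ [st.2], if p.1 == 0 then p.2 else st.2 ++ " " ++ p.2)) ([], "")
  let prefixes := p1.1
  -- pass 2: suffixes[i] = " ".join(toks[i+1:]), built incrementally on the reversed list
  let p2 := (PySem.List.enumerate toks.reverse).foldl
    (fun (st : List String × String) p =>
      (st.1 ++ [st.2], if p.1 == 0 then p.2 else p.2 ++ " " ++ st.2)) ([], "")
  let suffixes := p2.1.reverse
  -- pass 3: assemble each variant from the tables
  (PySem.List.enumerate (prefixes.zip (toks.zip suffixes))).foldl
    (fun out p =>
      let parts := (if 0 < p.1 then [p.2.1] else [])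
        ++ [pvMark p.2.2.1]
        ++ (if p.1 < n - 1 then [p.2.2.2] else [])
      out ++ [PySem.Str.join " " parts]) []

-- ===== PRECONDITION & SPEC =====
def Spec_add_context_marker (surface_seq : String) (out : List String) : Prop := out = add_context_marker_alt surface_seq
instance (surface_seq : String) (out : List String) : Decidable (Spec_add_context_marker surface_seq out) := by unfold Spec_add_context_marker; infer_instance

-- ===== CLAIM (what is proved, stated in full; the proofs are below) =====
def Claim_equal_add_context_marker : Prop := ∀ (surface_seq : String), Dom_add_context_marker surface_seq → Spec_add_context_marker surface_seq (add_context_marker surface_seq)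

-- ===== LEMMAS AND PROOFS =====

-- " ".join
def pvJp (l : List String) : String := PySem.Str.join " " l
-- forward / backward single-space accumulation (pass-1 / pass-2 loop states)
def pvCat (acc : String) (l : List String) : String := l.foldl (fun a t => a ++ " " ++ t) acc
def pvScat (acc : String) (l : List String) : String := l.foldl (fun a t => t ++ " " ++ a) acc

lemma pvChars_join_append (sep : List Char) (l1 l2 : List (List Char)) (h1 : l1 ≠ []) (h2 : l2 ≠ []) :
    PySem.Chars.join sep (l1 ++ l2) = PySem.Chars.join sep l1 ++ sep ++ PySem.Chars.join sep l2 := by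
  induction l1 with
  | nil => exact absurd rfl h1
  | cons a l1' ih =>
    cases l1' with
    | nil =>
      cases l2 with
      | nil => exact absurd rfl h2
      | cons b l2' => simp [PySem.Chars.join_singleton, PySem.Chars.join_cons_cons]
    | cons a2 l1'' =>
      rw [show (a :: a2 :: l1'') ++ l2 = a :: a2 :: (l1'' ++ l2) from rfl,
        PySem.Chars.join_cons_cons, PySem.Chars.join_cons_cons,
        show a2 :: (l1'' ++ l2) = (a2 :: l1'') ++ l2 from rfl,
        ih (by simp)]
      simp [List.append_assoc]

lemma pvJp_append (l1 l2 : List String) (h1 : l1 ≠ []) (h2 : l2 ≠ []) :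
    pvJp (l1 ++ l2) = pvJp l1 ++ " " ++ pvJp l2 := by
  apply String.toList_inj.mp
  simp only [pvJp, String.toList_append, PySem.Str.join, List.map_append]
  rw [pvChars_join_append _ _ _ (by simpa using h1) (by simpa using h2)]
  simp

lemma pvJp_singleton (a : String) : pvJp [a] = a := by
  apply String.toList_inj.mp
  simp [pvJp, PySem.Str.join, PySem.Chars.join_singleton]

lemma pvMark_map_none (rest : List (Int × String)) (x : Int) (h : ∀ q ∈ rest, x ≠ q.1) :
    rest.map (fun q => if x ≠ q.1 then q.2 else pvMark q.2) = rest.map (·.2) := by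
  induction rest with
  | nil => rfl
  | cons a r ih =>
    simp only [List.map_cons, if_pos (h a (by simp))]
    rw [ih (fun q hq => h q (by simp [hq]))]

lemma pvMark_map (toks : List String) (s : Int) (i : Nat) (h : i < toks.length) :
    (PySem.List.enumerate toks s).map (fun q => if s + (i : Int) ≠ q.1 then q.2 else pvMark q.2)
      = toks.take i ++ [pvMark toks[i]] ++ toks.drop (i + 1) := by
  induction toks generalizing s i with
  | nil => simp at h
  | cons t rest ih =>
    rw [PySem.List.enumerate_cons, List.map_cons]
    cases i with
    | zero =>
      simp only [Int.natCast_zero, add_zero]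
      rw [if_neg (by omega), pvMark_map_none _ _ (fun q hq => ?_)]
      · simp [PySem.List.map_snd_enumerate]
      · have := (PySem.List.mem_enumerate_iff _ _ _).mp hq
        obtain ⟨k, hk, rfl⟩ := this
        omega
    | succ i' =>
      have hne : s + ((i' + 1 : Nat) : Int) ≠ s := by push_cast; omega
      rw [if_pos hne]
      have harg : (fun (q : Int × String) => if s + ((i' + 1 : Nat) : Int) ≠ q.1 then q.2 else pvMark q.2)
          = (fun q => if (s + 1) + (i' : Int) ≠ q.1 then q.2 else pvMark q.2) := by
        funext q; congr 2; push_cast; ring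
      rw [harg, ih (s + 1) i' (by simpa using h)]
      simp

lemma pvCat_jp (l m : List String) (hm : m ≠ []) : pvCat (pvJp m) l = pvJp (m ++ l) := by
  induction l generalizing m with
  | nil => simp [pvCat]
  | cons a l' ih =>
    have h1 : pvJp m ++ " " ++ a = pvJp (m ++ [a]) := by
      rw [pvJp_append m [a] hm (by simp), pvJp_singleton]
    calc pvCat (pvJp m) (a :: l') = pvCat (pvJp m ++ " " ++ a) l' := rfl
      _ = pvCat (pvJp (m ++ [a])) l' := by rw [h1]
      _ = pvJp ((m ++ [a]) ++ l') := ih _ (by simp)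
      _ = pvJp (m ++ a :: l') := by simp

lemma pvScat_jp (l m : List String) (hm : m ≠ []) : pvScat (pvJp m) l = pvJp (l.reverse ++ m) := by
  induction l generalizing m with
  | nil => simp [pvScat]
  | cons a l' ih =>
    have h1 : a ++ " " ++ pvJp m = pvJp (a :: m) := by
      rw [show a :: m = [a] ++ m from rfl, pvJp_append [a] m (by simp) hm, pvJp_singleton]
    calc pvScat (pvJp m) (a :: l') = pvScat (a ++ " " ++ pvJp m) l' := rfl
      _ = pvScat (pvJp (a :: m)) l' := by rw [h1]
      _ = pvJp (l'.reverse ++ (a :: m)) := ih _ (by simp)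
      _ = pvJp ((a :: l').reverse ++ m) := by simp

lemma pvPrefixFold (l : List String) (k : Int) (hk : 1 ≤ k) (accL : List String) (acc : String) :
    (PySem.List.enumerate l k).foldl
      (fun (st : List String × String) p =>
        (st.1 ++ [st.2], if p.1 == 0 then p.2 else st.2 ++ " " ++ p.2)) (accL, acc)
      = (accL ++ (List.range l.length).map (fun i => pvCat acc (l.take i)), pvCat acc l) := by
  induction l generalizing k accL acc with
  | nil => simp [pvCat]
  | cons t rest ih =>
    rw [PySem.List.enumerate_cons, List.foldl_cons]
    have hk0 : (k == 0) = false := by simp; omega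
    simp only [hk0, Bool.false_eq_true, if_false]
    rw [ih (k+1) (by omega)]
    simp only [Prod.mk.injEq]
    refine ⟨?_, rfl⟩
    rw [List.length_cons, List.range_succ_eq_map, List.map_cons, List.map_map]
    simp only [List.take_zero, List.append_assoc, List.singleton_append]
    rfl

lemma pvSuffixFold (l : List String) (k : Int) (hk : 1 ≤ k) (accL : List String) (acc : String) :
    (PySem.List.enumerate l k).foldl
      (fun (st : List String × String) p =>
        (st.1 ++ [st.2], if p.1 == 0 then p.2 else p.2 ++ " " ++ st.2)) (accL, acc)
      = (accL ++ (List.range l.length).map (fun i => pvScat acc (l.take i)), pvScat acc l) := by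
  induction l generalizing k accL acc with
  | nil => simp [pvScat]
  | cons t rest ih =>
    rw [PySem.List.enumerate_cons, List.foldl_cons]
    have hk0 : (k == 0) = false := by simp; omega
    simp only [hk0, Bool.false_eq_true, if_false]
    rw [ih (k+1) (by omega)]
    simp only [Prod.mk.injEq]
    refine ⟨?_, rfl⟩
    rw [List.length_cons, List.range_succ_eq_map, List.map_cons, List.map_map]
    simp only [List.take_zero, List.append_assoc, List.singleton_append]
    rfl

lemma pvPrefixes (toks : List String) :
    ((PySem.List.enumerate toks).foldl
      (fun (st : List String × String) p =>
        (st.1 ++ [st.2], if p.1 == 0 then p.2 else st.2 ++ " " ++ p.2)) ([], "")).1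
      = (List.range toks.length).map (fun i => pvJp (toks.take i)) := by
  cases toks with
  | nil => rfl
  | cons t rest =>
    rw [show PySem.List.enumerate (t :: rest) = PySem.List.enumerate (t :: rest) 0 from rfl,
      PySem.List.enumerate_cons, List.foldl_cons]
    simp only [show ((0 : Int) == 0) = true from rfl, if_pos]
    rw [show (0:Int) + 1 = 1 from rfl, pvPrefixFold rest 1 (by omega)]
    have hr : (List.range (t :: rest).length).map (fun i => pvJp (List.take i (t :: rest)))
        = "" :: (List.range rest.length).map (fun i => pvCat t (List.take i rest)) := by
      rw [List.length_cons, List.range_succ_eq_map, List.map_cons, List.map_map]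
      congr 1
      apply List.map_congr_left
      intro a _
      show pvJp (t :: List.take a rest) = pvCat t (List.take a rest)
      have h := pvCat_jp (List.take a rest) [t] (by simp)
      rw [pvJp_singleton] at h
      exact h.symm
    rw [hr]
    rfl

lemma pvSuffixesRev (r : List String) :
    ((PySem.List.enumerate r).foldl
      (fun (st : List String × String) p =>
        (st.1 ++ [st.2], if p.1 == 0 then p.2 else p.2 ++ " " ++ st.2)) ([], "")).1
      = (List.range r.length).map (fun i => pvJp ((r.take i).reverse)) := by
  cases r with
  | nil => rfl
  | cons t rest =>
    rw [show PySem.List.enumerate (t :: rest) = PySem.List.enumerate (t :: rest) 0 from rfl,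
      PySem.List.enumerate_cons, List.foldl_cons]
    simp only [show ((0 : Int) == 0) = true from rfl, if_pos]
    rw [show (0:Int) + 1 = 1 from rfl, pvSuffixFold rest 1 (by omega)]
    have hr : (List.range (t :: rest).length).map (fun i => pvJp (((t :: rest).take i).reverse))
        = "" :: (List.range rest.length).map (fun i => pvScat t (List.take i rest)) := by
      rw [List.length_cons, List.range_succ_eq_map, List.map_cons, List.map_map]
      congr 1
      apply List.map_congr_left
      intro a _
      show pvJp ((t :: List.take a rest).reverse) = pvScat t (List.take a rest)
      have h := pvScat_jp (List.take a rest) [t] (by simp)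
      rw [pvJp_singleton] at h
      rw [h, List.reverse_cons]
    rw [hr]
    rfl

lemma pvSuffixes (toks : List String) :
    (((PySem.List.enumerate toks.reverse).foldl
      (fun (st : List String × String) p =>
        (st.1 ++ [st.2], if p.1 == 0 then p.2 else p.2 ++ " " ++ st.2)) ([], "")).1).reverse
      = (List.range toks.length).map (fun i => pvJp (toks.drop (i + 1))) := by
  rw [pvSuffixesRev]
  apply List.ext_getElem
  · simp
  intro i h1 h2
  simp only [List.getElem_reverse, List.getElem_map, List.getElem_range]
  simp only [List.length_map, List.length_range, List.length_reverse] at h1 ⊢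
  congr 1
  have hn : i < toks.length := by simpa using h2
  rw [List.take_reverse]
  rw [List.reverse_reverse]
  congr 1
  omega

lemma pvPointwise (toks : List String) (i : Nat) (h : i < toks.length) :
    pvJp (toks.take i ++ [pvMark toks[i]] ++ toks.drop (i + 1))
      = pvJp ((if 0 < (i : Int) then [pvJp (toks.take i)] else [])
          ++ [pvMark toks[i]]
          ++ (if (i : Int) < (toks.length : Int) - 1 then [pvJp (toks.drop (i + 1))] else [])) := by
  by_cases hi0 : i = 0
  · subst hi0
    rw [if_neg (by omega)]
    by_cases hl : toks.drop (0 + 1) = []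
    · have : ¬ ((0 : Nat) : Int) < (toks.length : Int) - 1 := by
        rw [List.drop_eq_nil_iff] at hl; omega
      rw [if_neg this, hl]
      simp
    · have : ((0 : Nat) : Int) < (toks.length : Int) - 1 := by
        rw [List.drop_eq_nil_iff] at hl; omega
      rw [if_pos this]
      simp only [List.take_zero, List.nil_append]
      rw [pvJp_append [pvMark toks[0]] _ (by simp) hl,
        pvJp_append [pvMark toks[0]] [pvJp (toks.drop (0 + 1))] (by simp) (by simp),
        pvJp_singleton, pvJp_singleton]
  · have ht1 : toks.take i ≠ [] := by
      apply List.ne_nil_of_length_pos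
      rw [List.length_take]
      omega
    rw [if_pos (show (0 : Int) < (i : Int) by omega)]
    by_cases hl : toks.drop (i + 1) = []
    · have : ¬ ((i : Nat) : Int) < (toks.length : Int) - 1 := by
        rw [List.drop_eq_nil_iff] at hl; omega
      rw [if_neg this, hl]
      simp only [List.append_nil]
      rw [pvJp_append _ [pvMark toks[i]] ht1 (by simp),
        pvJp_append [pvJp (toks.take i)] [pvMark toks[i]] (by simp) (by simp),
        pvJp_singleton, pvJp_singleton]
    · have hlen : i + 1 < toks.length := by
        by_contra hc
        exact hl (List.drop_eq_nil_iff.mpr (by omega))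
      rw [if_pos (show ((i : Nat) : Int) < (toks.length : Int) - 1 by omega)]
      rw [List.append_assoc, List.append_assoc,
        pvJp_append (toks.take i) _ ht1 (by simp),
        pvJp_append [pvMark toks[i]] _ (by simp) hl,
        pvJp_append [pvJp (toks.take i)] _ (by simp) (by simp),
        pvJp_append [pvMark toks[i]] [pvJp (toks.drop (i + 1))] (by simp) (by simp),
        pvJp_singleton, pvJp_singleton, pvJp_singleton]

lemma pvMain (toks : List String) :
    (PySem.List.enumerate toks).foldl
      (fun ret p =>
        ret ++ [PySem.Str.join " " ((PySem.List.enumerate toks).map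
          (fun q => if p.1 ≠ q.1 then q.2 else pvMark q.2))]) []
    = (PySem.List.enumerate
        (((List.range toks.length).map (fun i => pvJp (toks.take i))).zip
          (toks.zip ((List.range toks.length).map (fun i => pvJp (toks.drop (i + 1))))))).foldl
      (fun out p =>
        out ++ [PySem.Str.join " "
          ((if 0 < p.1 then [p.2.1] else [])
            ++ [pvMark p.2.2.1]
            ++ (if p.1 < (toks.length : Int) - 1 then [p.2.2.2] else []))]) [] := by
  rw [show (fun (ret : List String) p =>
        ret ++ [PySem.Str.join " " ((PySem.List.enumerate toks).map
          (fun (q : Int × String) => if p.1 ≠ q.1 then q.2 else pvMark q.2))])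
      = (fun ret (p : Int × String) =>
        ret ++ [(fun (p : Int × String) => PySem.Str.join " " ((PySem.List.enumerate toks).map
          (fun (q : Int × String) => if p.1 ≠ q.1 then q.2 else pvMark q.2))) p]) from rfl,
    PySem.List.foldl_append_singleton_eq_map,
    show (fun (out : List String) (p : Int × (String × (String × String))) =>
        out ++ [PySem.Str.join " "
          ((if 0 < p.1 then [p.2.1] else [])
            ++ [pvMark p.2.2.1]
            ++ (if p.1 < (toks.length : Int) - 1 then [p.2.2.2] else []))])
      = (fun out (p : Int × (String × (String × String))) =>
        out ++ [(fun (p : Int × (String × (String × String))) => PySem.Str.join " "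
          ((if 0 < p.1 then [p.2.1] else [])
            ++ [pvMark p.2.2.1]
            ++ (if p.1 < (toks.length : Int) - 1 then [p.2.2.2] else []))) p]) from rfl,
    PySem.List.foldl_append_singleton_eq_map]
  apply List.ext_getElem
  · simp
  intro i h1 h2
  have hi : i < toks.length := by simpa using h1
  simp only [List.nil_append, List.getElem_map, PySem.List.getElem_enumerate,
    List.getElem_zip, List.getElem_range, zero_add]
  have hmm := pvMark_map toks 0 i hi
  simp only [zero_add] at hmm
  rw [hmm]
  exact pvPointwise toks i hi

-- ===== VERDICT (by name: the statement is the Claim_ definition above) =====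
theorem add_context_marker_spec : Claim_equal_add_context_marker := by
  intro s _
  unfold Spec_add_context_marker add_context_marker add_context_marker_alt
  dsimp only
  rw [pvPrefixes, pvSuffixes]
  exact pvMain (PySem.Str.split₀ s)
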